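-- pv_equiv track=rewrite | github.com/jonathan10620/excel_cleaning_assignment | helpers/writing_helpers.py | duplicate_row_list
-- ===== SOURCE A (Python) =====
-- def duplicate_row_list(values):
--     # iterates through list of values and checks for duplicates and if so returns list of index where duplicates are found
--     l = []
--     duplicate_indexes = []
--     for n, row in enumerate(values, 2):
--         if row in l:
--             duplicate_indexes.append((n, row))
--         l.append(row)
--
--     return duplicate_indexes
-- ===== SOURCE B (Python) =====
-- def duplicate_row_list(values):
--     # Build an index: value -> list of indices (enumerated from 2) where it occurs,
--     # then report every non-first occurrence of each group, in index order.
--     groups = {}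
--     for n, row in enumerate(values, 2):
--         groups.setdefault(row, []).append(n)
--     dups = [(n, row) for row, ns in groups.items() for n in ns[1:]]
--     dups.sort(key=lambda p: p[0])
--     return dups
-- ===== Notes on version B (the rewrite author's own statement) =====
-- stated objective: alternative
-- what changed: Replaces the emit-while-scanning linear membership test with a one-pass dict grouping of indices by value, then reports each group's non-first indices and sorts by index to restore encounter order.
import Mathlib
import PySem

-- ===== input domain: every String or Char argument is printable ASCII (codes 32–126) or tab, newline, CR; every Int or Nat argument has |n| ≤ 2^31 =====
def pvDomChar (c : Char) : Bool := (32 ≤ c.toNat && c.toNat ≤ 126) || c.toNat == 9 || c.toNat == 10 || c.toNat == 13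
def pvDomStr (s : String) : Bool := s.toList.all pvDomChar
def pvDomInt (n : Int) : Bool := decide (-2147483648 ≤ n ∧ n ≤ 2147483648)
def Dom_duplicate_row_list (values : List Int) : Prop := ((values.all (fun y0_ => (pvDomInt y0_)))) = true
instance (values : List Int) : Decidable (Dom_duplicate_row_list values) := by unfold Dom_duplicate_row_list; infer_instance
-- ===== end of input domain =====

-- B replaces A's quadratic scan-with-membership-list by a dict grouping indices per value,
-- then emitting each group's non-first indices sorted by index (objective: alternative).

-- ===== PORT A =====
def duplicate_row_list (values : List Int) : List (Int × Int) :=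
  ((PySem.List.enumerate values 2).foldl
    (fun (st : List Int × List (Int × Int)) p =>
      (st.1 ++ [p.2], if p.2 ∈ st.1 then st.2 ++ [p] else st.2))
    ([], [])).2

-- ===== PORT B =====
def duplicate_row_list_alt (values : List Int) : List (Int × Int) :=
  let groups : PySem.Dict Int (List Int) :=
    (PySem.List.enumerate values 2).foldl
      (fun d p => d.modify p.2 [] (fun ns => ns ++ [p.1])) PySem.Dict.empty
  let dups := groups.items.flatMap (fun g => (g.2.drop 1).map (fun n => (n, g.1)))
  PySem.List.sorted dups (fun q => q.1) false

-- ===== PRECONDITION & SPEC =====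
def Spec_duplicate_row_list (values : List Int) (out : List (Int × Int)) : Prop := out = duplicate_row_list_alt values
instance (values : List Int) (out : List (Int × Int)) : Decidable (Spec_duplicate_row_list values out) := by unfold Spec_duplicate_row_list; infer_instance

-- ===== CLAIM (what is proved, stated in full; the proofs are below) =====
def Claim_equal_duplicate_row_list : Prop := ∀ (values : List Int), Dom_duplicate_row_list values → Spec_duplicate_row_list values (duplicate_row_list values)

-- ===== LEMMAS AND PROOFS =====

-- A's loop, as a structural recursion: l = rows seen so far, s = next index.
def dupG (l : List Int) (s : Int) (xs : List Int) : List (Int × Int) :=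
  match xs with
  | [] => []
  | x :: xs => (if x ∈ l then [(s, x)] else []) ++ dupG (l ++ [x]) (s + 1) xs

-- indices at which r occurs in xs, enumerating from s
def occIdx (r : Int) (xs : List Int) (s : Int) : List Int :=
  ((PySem.List.enumerate xs s).filter (fun p => p.2 == r)).map (·.1)

lemma dupA_fold (xs : List Int) : ∀ (l : List Int) (d : List (Int × Int)) (s : Int),
    ((PySem.List.enumerate xs s).foldl
      (fun (st : List Int × List (Int × Int)) p =>
        (st.1 ++ [p.2], if p.2 ∈ st.1 then st.2 ++ [p] else st.2))
      (l, d)).2 = d ++ dupG l s xs := by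
  induction xs with
  | nil => intro l d s; simp [PySem.List.enumerate_nil, dupG]
  | cons x xs ih =>
    intro l d s
    simp only [PySem.List.enumerate_cons, List.foldl_cons, dupG]
    by_cases h : x ∈ l <;> simp [h, ih]

lemma dupG_fst_ge (xs : List Int) : ∀ (l : List Int) (s : Int) (p : Int × Int),
    p ∈ dupG l s xs → s ≤ p.1 := by
  induction xs with
  | nil => intro l s p h; simp [dupG] at h
  | cons x xs ih =>
    intro l s p h
    simp only [dupG, List.mem_append] at h
    rcases h with h | h
    · split at h <;> simp_all
    · have := ih (l ++ [x]) (s + 1) p h; omega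

lemma dupG_pairwise (xs : List Int) : ∀ (l : List Int) (s : Int),
    (dupG l s xs).Pairwise (fun a b => a.1 < b.1) := by
  induction xs with
  | nil => intro l s; simp [dupG]
  | cons x xs ih =>
    intro l s
    simp only [dupG]
    refine List.pairwise_append.2 ⟨?_, ih _ _, ?_⟩
    · split <;> simp
    · intro a ha b hb
      have hb' := dupG_fst_ge xs (l ++ [x]) (s + 1) b hb
      split at ha <;> simp_all

lemma dupG_snd_mem (xs : List Int) : ∀ (l : List Int) (s : Int) (p : Int × Int),
    p ∈ dupG l s xs → p.2 ∈ l ∨ p.2 ∈ xs := by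
  induction xs with
  | nil => intro l s p h; simp [dupG] at h
  | cons x xs ih =>
    intro l s p h
    simp only [dupG, List.mem_append] at h
    rcases h with h | h
    · split at h <;> simp_all
    · rcases ih (l ++ [x]) (s + 1) p h with h' | h'
      · simp only [List.mem_append, List.mem_singleton] at h'
        rcases h' with h' | h' <;> simp [h']
      · simp [h']

lemma occIdx_cons (r x : Int) (xs : List Int) (s : Int) :
    occIdx r (x :: xs) s = (if x == r then [s] else []) ++ occIdx r xs (s + 1) := by
  simp only [occIdx, PySem.List.enumerate_cons, List.filter_cons]
  by_cases h : x = r <;> simp [h]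

-- filtering A's duplicates by row r gives exactly the non-first (or all, if r already seen) indices of r
lemma dupG_filter (r : Int) (xs : List Int) : ∀ (l : List Int) (s : Int),
    (dupG l s xs).filter (fun p => p.2 == r)
      = (if r ∈ l then occIdx r xs s else (occIdx r xs s).drop 1).map (fun n => (n, r)) := by
  induction xs with
  | nil => intro l s; simp [dupG, occIdx, PySem.List.enumerate_nil]
  | cons x xs ih =>
    intro l s
    simp only [dupG, List.filter_append, occIdx_cons]
    by_cases hx : x = r
    · subst hx
      by_cases hl : x ∈ l
      · simp [hl, ih]
      · simp [hl, ih]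
    · have hmem : r ∈ l ++ [x] ↔ r ∈ l := by simp [Ne.symm hx]
      have : (if x ∈ l then [(s, x)] else []).filter (fun p => p.2 == r) = [] := by
        split <;> simp [hx]
      rw [this, ih (l ++ [x]) (s + 1)]
      by_cases hl : r ∈ l <;> simp [hl, hmem, hx]

-- a list is a permutation of its partition into per-key filters over distinct keys
lemma partition_perm (ks : List Int) : ∀ (L : List (Int × Int)), ks.Nodup →
    (∀ p ∈ L, p.2 ∈ ks) →
    (ks.flatMap (fun r => L.filter (fun p => p.2 == r))).Perm L := by
  induction ks with
  | nil => intro L _ hall; simp [List.eq_nil_iff_forall_not_mem.2 (fun p hp => by simpa using hall p hp)]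
  | cons k ks ih =>
    intro L hnd hall
    simp only [List.flatMap_cons]
    have hnd' := (List.nodup_cons.mp hnd)
    have hfix : ∀ r ∈ ks, (L.filter (fun p => !(p.2 == k))).filter (fun p => p.2 == r)
        = L.filter (fun p => p.2 == r) := by
      intro r hr
      rw [List.filter_filter]
      apply List.filter_congr
      intro p hp
      by_cases h : p.2 = r
      · have hne : p.2 ≠ k := by rintro rfl; exact hnd'.1 (h ▸ hr)
        have : ¬ r = k := fun hrk => hne (h.trans hrk)
        simp [h, this]
      · simp [h]
    have hperm : (ks.flatMap (fun r => L.filter (fun p => p.2 == r))).Perm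
        (L.filter (fun p => !(p.2 == k))) := by
      have := ih (L.filter (fun p => !(p.2 == k))) hnd'.2 ?_
      · refine List.Perm.trans ?_ this
        apply List.Perm.of_eq
        exact (List.flatMap_congr (fun r hr => (hfix r hr).symm))
      · intro p hp
        have hp' := List.mem_of_mem_filter hp
        have := hall p hp'
        have hk : ¬ (p.2 == k) = true := by
          have := List.of_mem_filter hp; simpa using this
        simp only [List.mem_cons] at this
        rcases this with h | h
        · exact absurd (by simp [h]) hk
        · exact h
    exact (List.Perm.append_left _ hperm).trans (List.filter_append_perm _ L)

theorem duplicate_row_list_spec_aux (values : List Int) :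
    duplicate_row_list values = duplicate_row_list_alt values := by
  unfold duplicate_row_list duplicate_row_list_alt
  rw [dupA_fold values [] [] 2]
  set E := PySem.List.enumerate values 2 with hE
  set groups : PySem.Dict Int (List Int) :=
    E.foldl (fun d p => d.modify p.2 [] (fun ns => ns ++ [p.1])) PySem.Dict.empty with hG
  -- the grouping fold, seen through the swapped pair list
  have hswap : groups =
      (E.map Prod.swap).foldl (fun d p => d.modify p.1 [] (fun ns => ns ++ [p.2]))
        PySem.Dict.empty := by
    rw [hG, List.foldl_map]
    rfl
  have hkeys : groups.keys = PySem.List.dedup values := by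
    rw [hG]
    rw [PySem.Dict.keys_foldl_modify_key E (fun p => p.2) []
      (fun _ p => fun ns => ns ++ [p.1]) PySem.Dict.empty]
    rw [hE, PySem.List.map_snd_enumerate]
    simp [pysem, PySem.Dict.keys_empty]
  have hnd : groups.keys.Nodup := by rw [hkeys]; exact PySem.List.nodup_dedup values
  have hgetD : ∀ r : Int, groups.getD r [] = occIdx r values 2 := by
    intro r
    rw [hswap, PySem.Dict.getD_foldl_modify_append (E.map Prod.swap) PySem.Dict.empty r]
    simp only [PySem.Dict.getD_empty, List.nil_append, List.filter_map, List.map_map]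
    rfl
  have hitems : groups.items = (PySem.List.dedup values).map
      (fun r => (r, occIdx r values 2)) := by
    rw [PySem.Dict.items_eq_map_keys groups hnd []]
    rw [hkeys]
    exact List.map_congr_left (fun r _ => by rw [hgetD r])
  -- B's unsorted duplicate list equals the per-key partition of A's result
  have hflat : groups.items.flatMap (fun g => (g.2.drop 1).map (fun n => (n, g.1)))
      = (PySem.List.dedup values).flatMap
          (fun r => (dupG [] 2 values).filter (fun p => p.2 == r)) := by
    rw [hitems, List.flatMap_map]
    exact List.flatMap_congr (fun r _ => by rw [dupG_filter r values [] 2]; simp)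
  rw [List.nil_append]
  show dupG [] 2 values = PySem.List.sorted
    (groups.items.flatMap (fun g => (g.2.drop 1).map (fun n => (n, g.1)))) (fun q => q.1)
  rw [hflat]
  refine (PySem.List.sorted_eq_of_perm_of_pairwise_lt _ _ _ ?_ ?_).symm
  · refine (partition_perm (PySem.List.dedup values) (dupG [] 2 values)
      (PySem.List.nodup_dedup values) ?_).symm
    intro p hp
    rcases dupG_snd_mem values [] 2 p hp with h | h
    · simp at h
    · exact (PySem.List.mem_dedup values p.2).2 h
  · exact dupG_pairwise values [] 2

-- ===== VERDICT (by name: the statement is the Claim_ definition above) =====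
theorem duplicate_row_list_spec : Claim_equal_duplicate_row_list := by
  intro values _
  unfold Spec_duplicate_row_list
  exact duplicate_row_list_spec_aux values
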